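-- pv_equiv track=rewrite | github.com/eliottcassidy2000/math | 04-computation/n9_threebythree_creative.py | build_lex_product
-- ===== SOURCE A (Python) =====
-- def build_lex_product(adj1, n1, adj2, n2):
--     """Build lexicographic product T₁ ⊠ T₂."""
--     N = n1 * n2
--     adj = [0] * N
--     for v1 in range(N):
--         i1, j1 = v1 // n2, v1 % n2
--         for v2 in range(N):
--             if v1 == v2:
--                 continue
--             i2, j2 = v2 // n2, v2 % n2
--             if i1 != i2:
--                 # Use T₁ to decide
--                 if adj1[i1] & (1 << i2):
--                     adj[v1] |= (1 << v2)
--             else: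
--                 # Same block, use T₂
--                 if adj2[j1] & (1 << j2):
--                     adj[v1] |= (1 << v2)
--     return adj
-- ===== SOURCE B (Python) =====
-- def build_lex_product(adj1, n1, adj2, n2):
--     """Build lexicographic product T1 x T2 (per-vertex bitmask construction)."""
--     if n1 <= 0 or n2 <= 0:
--         return []
--     full = (1 << n2) - 1
--     adj = []
--     for i1 in range(n1):
--         blocks = 0
--         for i2 in range(n1):
--             if i2 != i1 and (adj1[i1] >> i2) & 1:
--                 blocks |= full << (i2 * n2)
--         for j1 in range(n2):
--             row2 = 0
--             for j2 in range(n2):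
--                 if j2 != j1 and (adj2[j1] >> j2) & 1:
--                     row2 |= 1 << j2
--             adj.append(blocks | (row2 << (i1 * n2)))
--     return adj
-- ===== Notes on version B (the rewrite author's own statement) =====
-- stated objective: faster
-- what changed: Instead of testing every ordered pair of product vertices (O((n1*n2)^2) iterations), B builds each row directly from bitmask arithmetic: for each source block it ORs one full-block mask per set bit of the adj1 row, and adds the adj2 row (minus the self bit) shifted into the diagonal block, so the inner scan over all n1*n2 targets disappears.
-- outside the precondition, e.g. on build_lex_product([5], -1, [7], -1): A returns [0], B returns []
import Mathlib
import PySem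

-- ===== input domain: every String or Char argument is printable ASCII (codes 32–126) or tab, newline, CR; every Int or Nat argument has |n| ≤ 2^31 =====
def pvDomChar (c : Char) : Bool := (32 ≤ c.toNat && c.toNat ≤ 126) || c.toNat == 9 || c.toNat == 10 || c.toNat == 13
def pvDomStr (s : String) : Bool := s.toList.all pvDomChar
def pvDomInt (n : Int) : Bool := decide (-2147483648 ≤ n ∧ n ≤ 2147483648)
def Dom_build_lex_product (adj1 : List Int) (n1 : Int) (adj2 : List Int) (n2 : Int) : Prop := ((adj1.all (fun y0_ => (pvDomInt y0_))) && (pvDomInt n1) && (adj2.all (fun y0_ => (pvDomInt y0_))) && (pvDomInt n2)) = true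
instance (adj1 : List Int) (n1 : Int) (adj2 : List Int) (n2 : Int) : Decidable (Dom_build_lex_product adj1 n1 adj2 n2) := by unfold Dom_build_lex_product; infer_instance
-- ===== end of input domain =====

-- B replaces A's scan over every ordered pair of product vertices by a direct per-row
-- bitmask construction (full-block masks from adj1 bits, plus the adj2 row shifted into
-- the diagonal block); objective: faster (asymptotically fewer loop iterations).

-- ===== PORT A =====
def build_lex_product (adj1 : List Int) (n1 : Int) (adj2 : List Int) (n2 : Int) : List Int :=
  let N := n1 * n2
  (PySem.List.pyRange 0 N 1).foldl (fun adj v1 =>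
    let i1 := PySem.Int.floordiv v1 n2
    let j1 := PySem.Int.mod v1 n2
    (PySem.List.pyRange 0 N 1).foldl (fun adj v2 =>
      if v1 = v2 then adj
      else
        let i2 := PySem.Int.floordiv v2 n2
        let j2 := PySem.Int.mod v2 n2
        if i1 ≠ i2 then
          if PySem.Int.band (PySem.List.pyGetD adj1 i1 0) (1 <<< i2.toNat) ≠ 0 then
            PySem.List.pySetD adj v1 (PySem.Int.bor (PySem.List.pyGetD adj v1 0) (1 <<< v2.toNat))
          else adj
        else
          if PySem.Int.band (PySem.List.pyGetD adj2 j1 0) (1 <<< j2.toNat) ≠ 0 then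
            PySem.List.pySetD adj v1 (PySem.Int.bor (PySem.List.pyGetD adj v1 0) (1 <<< v2.toNat))
          else adj) adj) (List.replicate N.toNat (0 : Int))

-- ===== PORT B =====
def build_lex_product_alt (adj1 : List Int) (n1 : Int) (adj2 : List Int) (n2 : Int) : List Int :=
  if n1 ≤ 0 ∨ n2 ≤ 0 then []
  else
    let full : Int := (1 <<< n2.toNat) - 1
    (PySem.List.pyRange 0 n1 1).foldl (fun adj i1 =>
      let blocks := (PySem.List.pyRange 0 n1 1).foldl (fun b i2 =>
        if i2 ≠ i1 ∧ PySem.Int.band ((PySem.List.pyGetD adj1 i1 0) >>> i2.toNat) 1 ≠ 0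
        then PySem.Int.bor b (full <<< (i2 * n2).toNat) else b) 0
      (PySem.List.pyRange 0 n2 1).foldl (fun adj j1 =>
        let row2 := (PySem.List.pyRange 0 n2 1).foldl (fun r j2 =>
          if j2 ≠ j1 ∧ PySem.Int.band ((PySem.List.pyGetD adj2 j1 0) >>> j2.toNat) 1 ≠ 0
          then PySem.Int.bor r (1 <<< j2.toNat) else r) 0
        adj ++ [PySem.Int.bor blocks (row2 <<< (i1 * n2).toNat)]) adj) []

-- ===== PRECONDITION & SPEC =====
-- Pre_ excludes (i) n1 < 0 ∧ n2 < 0, where A walks N = n1*n2 > 0 vertices with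
-- negative-index wraparound (A raises ValueError/IndexError on all but degenerate
-- cases, where it returns a row of zeros), and (ii) positive sizes with adjacency
-- lists shorter than the n1 (resp. n2) rows Python indexes — there A itself raises
-- IndexError (a row i is only read when the side has ≥ 2 vertices, hence the guards).
def Pre_build_lex_product (adj1 : List Int) (n1 : Int) (adj2 : List Int) (n2 : Int) : Prop :=
  ((n1 ≤ 0 ∨ n2 ≤ 0) ∧ (0 ≤ n1 ∨ 0 ≤ n2)) ∨
  (0 < n1 ∧ 0 < n2 ∧ (2 ≤ n1 → n1 ≤ (adj1.length : Int)) ∧ (2 ≤ n2 → n2 ≤ (adj2.length : Int)))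
instance (adj1 : List Int) (n1 : Int) (adj2 : List Int) (n2 : Int) : Decidable (Pre_build_lex_product adj1 n1 adj2 n2) := by unfold Pre_build_lex_product; infer_instance

def pvWitness_build_lex_product : List Int × Int × List Int × Int := ([1, 2], 2, [1, 1], 2)

def Spec_build_lex_product (adj1 : List Int) (n1 : Int) (adj2 : List Int) (n2 : Int) (out : List Int) : Prop := out = build_lex_product_alt adj1 n1 adj2 n2
instance (adj1 : List Int) (n1 : Int) (adj2 : List Int) (n2 : Int) (out : List Int) : Decidable (Spec_build_lex_product adj1 n1 adj2 n2 out) := by unfold Spec_build_lex_product; infer_instance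

-- ===== CLAIM (what is proved, stated in full; the proofs are below) =====
def Claim_equal_build_lex_product : Prop := ∀ (adj1 : List Int) (n1 : Int) (adj2 : List Int) (n2 : Int), Dom_build_lex_product adj1 n1 adj2 n2 → Pre_build_lex_product adj1 n1 adj2 n2 → Spec_build_lex_product adj1 n1 adj2 n2 (build_lex_product adj1 n1 adj2 n2)

-- ===== LEMMAS AND PROOFS =====

-- Python's two's-complement bit k of an arbitrary int.
def pvBit (a : Int) (k : Nat) : Bool :=
  match a with
  | .ofNat m => m.testBit k
  | .negSucc m => !(m.testBit k)

lemma pv_and_one (q : Nat) : q &&& 1 = (q.testBit 0).toNat := by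
  rcases Nat.mod_two_eq_zero_or_one q with h | h <;>
    simp [Nat.and_one_is_mod, h, Nat.testBit_zero]

lemma pv_testBit_shiftRight_zero (m k : Nat) : (m >>> k).testBit 0 = m.testBit k := by
  simp [Nat.testBit_shiftRight (i := k) (j := 0) m]

lemma pv_shift_band_one_test (a : Int) (k : Nat) :
    (PySem.Int.band (a >>> k) 1 ≠ 0) ↔ pvBit a k = true := by
  cases a with
  | ofNat m =>
    have hs : Int.ofNat m >>> k = Int.ofNat (m >>> k) := rfl
    have h1 : (1 : Int) = ((1 : Nat) : Int) := rfl
    rw [hs, Int.ofNat_eq_natCast, h1, PySem.Int.band_natCast]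
    rw [pv_and_one, pv_testBit_shiftRight_zero]
    by_cases hb : m.testBit k <;> simp [pvBit, hb]
  | negSucc m =>
    have hs : Int.negSucc m >>> k = Int.negSucc (m >>> k) := Int.negSucc_shiftRight m k
    rw [hs]
    have h0 : ¬ (0 : Int) ≤ Int.negSucc (m >>> k) := (Int.negSucc_not_nonneg _).mp
    have h2 : (0 : Int) ≤ (1 : Int) := by norm_num
    simp only [PySem.Int.band, h0, if_false, h2, if_true]
    have hm : (-Int.negSucc (m >>> k) - 1).toNat = m >>> k := by
      rw [Int.neg_negSucc]; omega
    rw [hm]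
    have h1 : (1 : Int).toNat = 1 := rfl
    rw [h1, Nat.and_comm, pv_and_one, pv_testBit_shiftRight_zero]
    by_cases hb : m.testBit k <;> simp [pvBit, hb]

lemma pv_band_shift_test (a : Int) (k : Nat) :
    (PySem.Int.band a (1 <<< k) ≠ 0) ↔ pvBit a k = true := by
  rw [Nat.one_shiftLeft]
  cases a with
  | ofNat m =>
    rw [Int.ofNat_eq_natCast, PySem.Int.band_natCast]
    by_cases hb : m.testBit k <;> simp [pvBit, Nat.and_two_pow, hb]
  | negSucc m =>
    have h0 : ¬ (0 : Int) ≤ Int.negSucc m := (Int.negSucc_not_nonneg _).mp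
    have h2 : (0 : Int) ≤ ((2 ^ k : Nat) : Int) := by positivity
    simp only [PySem.Int.band, h0, if_false, h2, if_true]
    have hm : (-Int.negSucc m - 1).toNat = m := by
      rw [Int.neg_negSucc]; omega
    rw [hm, Int.toNat_natCast]
    by_cases hb : m.testBit k <;>
      simp [pvBit, Nat.and_comm, Nat.and_two_pow, hb]

lemma pv_natCast_shiftLeft (x k : Nat) : ((x : Int)) <<< k = ((x <<< k : Nat) : Int) := rfl

def pv_cA (adj1 adj2 : List Int) (n v t : Nat) : Bool :=
  !decide (t = v) &&
  (if v / n = t / n then pvBit (adj2.getD (v % n) 0) (t % n)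
   else pvBit (adj1.getD (v / n) 0) (t / n))

def pv_rowA (adj1 adj2 : List Int) (m n v : Nat) : Nat :=
  (List.range (m * n)).foldl (fun a t => if pv_cA adj1 adj2 n v t then a ||| 1 <<< t else a) 0

lemma pv_getD_set_self (xs : List Int) (v : Nat) (x : Int) (h : v < xs.length) :
    (xs.set v x).getD v 0 = x := by
  rw [List.getD_eq_getElem _ _ (by simpa using h)]
  simp

lemma pv_foldl_set (L : List Nat) (c : Nat → Bool) (u : Int → Nat → Int) (v : Nat)
    (adj : List Int) (hv : v < adj.length) :
    L.foldl (fun adj t => if c t then adj.set v (u (adj.getD v 0) t) else adj) adj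
    = adj.set v (L.foldl (fun a t => if c t then u a t else a) (adj.getD v 0)) := by
  induction L generalizing adj with
  | nil => simp only [List.foldl_nil, List.getD_eq_getElem adj 0 hv, List.set_getElem_self]
  | cons t L ih =>
    by_cases h : c t
    · simp only [List.foldl_cons, h, if_true]
      rw [ih _ (by simpa using hv), pv_getD_set_self _ _ _ hv, List.set_set]
    · simp only [List.foldl_cons, h]
      exact ih adj hv

lemma pv_foldl_bor_natCast (L : List Nat) (c : Nat → Bool) (f : Nat → Nat) (acc : Nat) :
    (L.foldl (fun (a : Int) k => if c k then PySem.Int.bor a ((f k : Nat) : Int) else a) (acc : Int))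
    = ((L.foldl (fun a k => if c k then a ||| f k else a) acc : Nat) : Int) := by
  induction L generalizing acc with
  | nil => rfl
  | cons x L ih => by_cases h : c x <;> simp [h, PySem.Int.bor_natCast, ih]

lemma pv_foldl_rows (f : List Int → Nat → List Int) (S : Nat → Int → Int)
    (hf : ∀ adj v, v < adj.length → f adj v = adj.set v (S v (adj.getD v 0)))
    (M : Nat) (tail : List Int) :
    (List.range M).foldl f (List.replicate M (0 : Int) ++ tail)
    = (List.range M).map (fun v => S v 0) ++ tail := by
  induction M generalizing tail with
  | zero => simp
  | succ M ih =>
    rw [List.range_succ, List.foldl_append, List.replicate_succ', List.append_assoc,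
      List.singleton_append, ih (0 :: tail)]
    simp only [List.foldl_cons, List.foldl_nil]
    have hml : ((List.range M).map (fun v => S v 0)).length = M := by simp
    rw [hf _ M (by simp)]
    have hget : ((List.range M).map (fun v => S v 0) ++ 0 :: tail).getD M 0 = 0 := by
      rw [List.getD_eq_getElem?_getD, List.getElem?_append_right (by omega)]
      simp [hml]
    rw [hget, List.set_append_right _ _ (by omega), hml]
    simp

def pv_blocks (adj1 : List Int) (m n i : Nat) : Nat :=
  (List.range m).foldl
    (fun b i2 => if ¬ i2 = i ∧ pvBit (adj1.getD i 0) i2 = true then b ||| (2 ^ n - 1) <<< (i2 * n) else b) 0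

def pv_row2 (adj2 : List Int) (n j : Nat) : Nat :=
  (List.range n).foldl
    (fun r j2 => if ¬ j2 = j ∧ pvBit (adj2.getD j 0) j2 = true then r ||| 1 <<< j2 else r) 0

def pv_rowB (adj1 adj2 : List Int) (m n i j : Nat) : Nat :=
  pv_blocks adj1 m n i ||| pv_row2 adj2 n j <<< (i * n)

lemma pv_fold_cast_acc {c : Nat → Prop} [DecidablePred c] (f : Nat → Nat) (L : List Nat) (acc : Nat) :
    L.foldl (fun (a : Int) k => if c k then PySem.Int.bor a ((f k : Nat) : Int) else a) ((acc : Nat) : Int)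
    = ((L.foldl (fun a k => if c k then a ||| f k else a) acc : Nat) : Int) := by
  induction L generalizing acc with
  | nil => rfl
  | cons x L ih => by_cases h : c x <;> simp [h, PySem.Int.bor_natCast, ih]

lemma pv_fold_cast {c : Nat → Prop} [DecidablePred c] (f : Nat → Nat) (L : List Nat) :
    L.foldl (fun (a : Int) k => if c k then PySem.Int.bor a ((f k : Nat) : Int) else a) (0 : Int)
    = ((L.foldl (fun a k => if c k then a ||| f k else a) 0 : Nat) : Int) :=
  pv_fold_cast_acc f L 0

lemma pv_flatMap_range {β : Type} (m n : Nat) (F : Nat → Nat → β) (hn : 0 < n) :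
    (List.range m).flatMap (fun i => (List.range n).map (fun j => F i j))
    = (List.range (m * n)).map (fun v => F (v / n) (v % n)) := by
  induction m with
  | zero => simp
  | succ M ih =>
    rw [List.range_succ, List.flatMap_append, ih]
    have h : (M + 1) * n = M * n + n := by ring
    rw [h, List.range_add, List.map_append]
    congr 1
    rw [List.flatMap_singleton, List.map_map]
    refine List.map_congr_left (fun j hj => ?_)
    have hjn : j < n := List.mem_range.mp hj
    have h1 : (M * n + j) / n = M := by
      rw [Nat.mul_comm M n, Nat.mul_add_div hn, Nat.div_eq_of_lt hjn, Nat.add_zero]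
    have h2 : (M * n + j) % n = j := by
      rw [Nat.mul_comm M n, Nat.mul_add_mod, Nat.mod_eq_of_lt hjn]
    simp only [Function.comp_apply, h1, h2]

-- testBit of an OR-accumulating fold (Prop condition).
lemma pv_testBit_foldl_or {c : Nat → Prop} [DecidablePred c] (f : Nat → Nat) (L : List Nat) (acc t : Nat) :
    ((L.foldl (fun a k => if c k then a ||| f k else a) acc).testBit t)
    = (acc.testBit t || L.any (fun k => decide (c k) && (f k).testBit t)) := by
  induction L generalizing acc with
  | nil => simp
  | cons x L ih =>
    by_cases h : c x <;> simp [h, ih, Nat.testBit_or, Bool.or_assoc]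

lemma pv_A_char (adj1 adj2 : List Int) (m n : Nat) (_hm : 0 < m) (_hn : 0 < n) :
    build_lex_product adj1 (m : Int) adj2 (n : Int)
    = (List.range (m * n)).map (fun v => (pv_rowA adj1 adj2 m n v : Int)) := by
  unfold build_lex_product
  simp only []
  have hmn : ((m : Int)) * (n : Int) = ((m * n : Nat) : Int) := by push_cast; ring
  rw [hmn, PySem.List.pyRange_zero_nat, Int.toNat_natCast, List.foldl_map]
  have happ : List.replicate (m * n) (0 : Int) = List.replicate (m * n) (0 : Int) ++ [] := by simp
  rw [happ]
  rw [pv_foldl_rows _ (fun v x => (List.range (m*n)).foldl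
        (fun a t => if pv_cA adj1 adj2 n v t then PySem.Int.bor a ((1 <<< t : Nat) : Int) else a) x)
      ?hf (m*n) []]
  · simp only [List.append_nil]
    refine List.map_congr_left (fun v hv => ?_)
    have h0 : (0 : Int) = ((0 : Nat) : Int) := rfl
    rw [h0, pv_foldl_bor_natCast]
    rfl
  case hf =>
    intro adj v hv
    rw [List.foldl_map]
    have hbody : (fun (adj : List Int) (t : Nat) =>
        (if (v : Int) = (t : Int) then adj
         else
          if PySem.Int.floordiv (v : Int) (n : Int) ≠ PySem.Int.floordiv (t : Int) (n : Int) then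
            if PySem.Int.band (PySem.List.pyGetD adj1 (PySem.Int.floordiv (v : Int) (n : Int)) 0)
                (1 <<< (PySem.Int.floordiv (t : Int) (n : Int)).toNat) ≠ 0 then
              PySem.List.pySetD adj (v : Int)
                (PySem.Int.bor (PySem.List.pyGetD adj (v : Int) 0) (1 <<< ((t : Int)).toNat))
            else adj
          else
            if PySem.Int.band (PySem.List.pyGetD adj2 (PySem.Int.mod (v : Int) (n : Int)) 0)
                (1 <<< (PySem.Int.mod (t : Int) (n : Int)).toNat) ≠ 0 then
              PySem.List.pySetD adj (v : Int)
                (PySem.Int.bor (PySem.List.pyGetD adj (v : Int) 0) (1 <<< ((t : Int)).toNat))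
            else adj))
        = (fun adj t => if pv_cA adj1 adj2 n v t
            then adj.set v (PySem.Int.bor (adj.getD v 0) ((1 <<< t : Nat) : Int)) else adj) := by
      funext adj t
      simp only [PySem.Int.floordiv_natCast, PySem.Int.mod_natCast, Int.toNat_natCast,
        PySem.List.pyGetD_natCast, PySem.List.pySetD_natCast, Nat.cast_inj]
      by_cases h1 : v = t
      · rw [if_pos h1]
        have hc : pv_cA adj1 adj2 n v t = false := by simp [pv_cA, h1.symm]
        rw [hc]
        simp
      · rw [if_neg h1]
        have hneq : ¬ t = v := fun h => h1 h.symm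
        by_cases h2 : v / n = t / n
        · rw [if_neg (not_not_intro (by exact_mod_cast h2))]
          have hc : pv_cA adj1 adj2 n v t = pvBit (adj2.getD (v % n) 0) (t % n) := by
            simp [pv_cA, hneq, h2]
          rw [hc]
          by_cases h3 : pvBit (adj2.getD (v % n) 0) (t % n) = true
          · rw [if_pos ((pv_band_shift_test _ _).mpr h3), if_pos h3]
          · rw [if_neg (fun hb => h3 ((pv_band_shift_test _ _).mp hb)), if_neg h3]
        · rw [if_pos (show ((v/n : Nat) : Int) ≠ ((t/n : Nat) : Int) by exact_mod_cast h2)]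
          have hc : pv_cA adj1 adj2 n v t = pvBit (adj1.getD (v / n) 0) (t / n) := by
            simp [pv_cA, hneq, h2]
          rw [hc]
          by_cases h3 : pvBit (adj1.getD (v / n) 0) (t / n) = true
          · rw [if_pos ((pv_band_shift_test _ _).mpr h3), if_pos h3]
          · rw [if_neg (fun hb => h3 ((pv_band_shift_test _ _).mp hb)), if_neg h3]
    rw [hbody]
    exact pv_foldl_set (List.range (m * n)) (fun t => pv_cA adj1 adj2 n v t)
      (fun a t => PySem.Int.bor a ((1 <<< t : Nat) : Int)) v adj hv

lemma pv_B_char (adj1 adj2 : List Int) (m n : Nat) (hm : 0 < m) (hn : 0 < n) :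
    build_lex_product_alt adj1 (m : Int) adj2 (n : Int)
    = (List.range (m * n)).map (fun v => (pv_rowB adj1 adj2 m n (v / n) (v % n) : Int)) := by
  unfold build_lex_product_alt
  rw [if_neg (by omega : ¬ ((m : Int) ≤ 0 ∨ (n : Int) ≤ 0))]
  simp only []
  have hfull : ((1 <<< ((n : Int)).toNat : Nat) : Int) - 1 = (((2 ^ n - 1 : Nat)) : Int) := by
    rw [Int.toNat_natCast, Nat.one_shiftLeft, Nat.cast_sub Nat.one_le_two_pow, Nat.cast_one]
  rw [hfull, PySem.List.pyRange_zero_nat (n := m), PySem.List.pyRange_zero_nat (n := n)]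
  simp only [List.foldl_map, PySem.List.pyGetD_natCast, Int.toNat_natCast,
    pv_shift_band_one_test, ← Nat.cast_mul, pv_natCast_shiftLeft, Nat.cast_inj, ne_eq]
  simp only [pv_fold_cast, pv_natCast_shiftLeft, PySem.Int.bor_natCast,
    PySem.List.foldl_append_eq_flatMap, ← List.map_eq_flatMap, List.nil_append]
  rw [pv_flatMap_range m n _ hn]
  rfl

lemma pv_row_eq (adj1 adj2 : List Int) (m n v : Nat) (hn : 0 < n) (hv : v < m * n) :
    pv_rowA adj1 adj2 m n v = pv_rowB adj1 adj2 m n (v / n) (v % n) := by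
  apply Nat.eq_of_testBit_eq
  intro t
  rw [pv_rowA, pv_rowB, pv_testBit_foldl_or, pv_row2, pv_blocks,
    Nat.testBit_or, Nat.testBit_shiftLeft, pv_testBit_foldl_or, pv_testBit_foldl_or]
  rw [Bool.eq_iff_iff]
  simp only [Bool.or_eq_true, Bool.and_eq_true, decide_eq_true_eq, List.any_eq_true,
    List.mem_range, Nat.one_shiftLeft, Nat.testBit_two_pow, Nat.testBit_shiftLeft,
    Nat.testBit_two_pow_sub_one, Nat.zero_testBit, Bool.false_or, ge_iff_le]
  -- arithmetic facts (x / n * n orientation so omega sees shared atoms)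
  have hd1 : v / n * n + v % n = v := Nat.div_add_mod' v n
  have hd2 : t / n * n + t % n = t := Nat.div_add_mod' t n
  have hm1 : v % n < n := Nat.mod_lt _ hn
  have hm2 : t % n < n := Nat.mod_lt _ hn
  have hvn : v / n < m := Nat.div_lt_of_lt_mul (by rw [Nat.mul_comm] at hv; exact hv)
  constructor
  · rintro ⟨k, hk, hcond, rfl⟩
    rw [pv_cA, Bool.and_eq_true] at hcond
    obtain ⟨hne, hcase⟩ := hcond
    have htv : ¬ k = v := by simpa using hne
    by_cases hb : v / n = k / n
    · right
      rw [if_pos hb] at hcase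
      have hq : v / n * n = k / n * n := by rw [hb]
      refine ⟨by omega, k % n, hm2, ⟨by omega, hcase⟩, by omega⟩
    · left
      have htm : k / n < m := Nat.div_lt_of_lt_mul (by rw [Nat.mul_comm] at hk; exact hk)
      rw [if_neg hb] at hcase
      exact ⟨k / n, htm, ⟨fun h => hb h.symm, hcase⟩, by omega, by omega⟩
  · rintro (⟨i2, hi2m, ⟨hne, hbit⟩, hle, hlt⟩ | ⟨hle, s, hsn, ⟨hne, hbit⟩, hst⟩)
    · have hexp : (i2 + 1) * n = i2 * n + n := by ring
      have hteq : t / n = i2 := Nat.div_eq_of_lt_le hle (by omega)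
      have hmul : (i2 + 1) * n ≤ m * n := Nat.mul_le_mul_right n (by omega)
      refine ⟨t, by omega, ?_, rfl⟩
      rw [pv_cA, Bool.and_eq_true]
      refine ⟨?_, ?_⟩
      · simp only [Bool.not_eq_eq_eq_not, Bool.not_true, decide_eq_false_iff_not]
        intro h
        rw [h] at hteq
        exact hne hteq.symm
      · rw [if_neg (fun h => hne (h ▸ hteq).symm), hteq]
        exact hbit
    · have hexp : (v / n + 1) * n = v / n * n + n := by ring
      have hteq : t / n = v / n := Nat.div_eq_of_lt_le hle (by omega)
      rw [hteq] at hd2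
      have hsmod : t % n = s := by omega
      have hmul : (v / n + 1) * n ≤ m * n := Nat.mul_le_mul_right n (by omega)
      refine ⟨t, by omega, ?_, rfl⟩
      rw [pv_cA, Bool.and_eq_true]
      refine ⟨?_, ?_⟩
      · simp only [Bool.not_eq_eq_eq_not, Bool.not_true, decide_eq_false_iff_not]
        omega
      · rw [if_pos hteq.symm, hsmod]
        exact hbit

-- ===== VERDICT (by name: the statement is the Claim_ definition above) =====
theorem build_lex_product_spec : Claim_equal_build_lex_product := by
  intro adj1 n1 adj2 n2 _hdom hpre
  unfold Spec_build_lex_product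
  rcases hpre with ⟨h1, h2⟩ | ⟨hm, hn, _, _⟩
  · -- degenerate sizes: both sides are []
    have hN : n1 * n2 ≤ 0 := by
      rcases h1 with h | h <;> rcases h2 with h' | h'
      · have h0 : n1 = 0 := le_antisymm h h'
        simp [h0]
      · nlinarith
      · nlinarith
      · have h0 : n2 = 0 := le_antisymm h h'
        simp [h0]
    have hA : build_lex_product adj1 n1 adj2 n2 = [] := by
      simp [build_lex_product, PySem.List.pyRange_one_eq_nil hN, Int.toNat_of_nonpos hN]
    have hB : build_lex_product_alt adj1 n1 adj2 n2 = [] := by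
      unfold build_lex_product_alt
      rw [if_pos]
      rcases h1 with h | h
      · exact Or.inl h
      · exact Or.inr h
    rw [hA, hB]
  · -- positive sizes
    obtain ⟨m, rfl⟩ : ∃ m : Nat, n1 = (m : Int) := ⟨n1.toNat, (Int.toNat_of_nonneg hm.le).symm⟩
    obtain ⟨n, rfl⟩ : ∃ n : Nat, n2 = (n : Int) := ⟨n2.toNat, (Int.toNat_of_nonneg hn.le).symm⟩
    have hm' : 0 < m := by exact_mod_cast hm
    have hn' : 0 < n := by exact_mod_cast hn
    rw [pv_A_char adj1 adj2 m n hm' hn', pv_B_char adj1 adj2 m n hm' hn']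
    refine List.map_congr_left (fun v hv => ?_)
    rw [pv_row_eq adj1 adj2 m n v hn' (List.mem_range.mp hv)]
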